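-- pv_equiv track=rewrite | github.com/anaolisilva/Intro-a-Python | EPs/escritora.py | dicio_sucessores
-- ===== SOURCE A (Python) =====
-- def dicio_sucessores(lst):
--     '''(list) -> dict
--
--     RECEBE uma lista `lst`.
--     RETORNA um dicionário em que
--
--         - as __chaves__ são os itens que ocorrem em lst e
--         - o  __valor__ associado a cada chave é a lista dos
--           itens que ocorrem imediatamente após a chave na lista lst.
--
--     Por convenção a lista correspondente ao valor do último item
--     na lst (=lst[-1]) contém o primeiro item da lista (=lst[0]).
--
--     Se a `lst` é a lista vazia a função deve retornar o dicionário vazio.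
--     '''
--     # modifique o código abaixo para conter a sua solução.
--
--
--
--     dic = {}
--
--     for i in range(0, len(lst), 1):
--
--         if lst[i] in dic:
--             if (i != len(lst)-1):
--                 dic[lst[i]] += [lst[i+1]]
--             else:
--                 dic[lst[i]] += [lst[0]]
--         else:
--             if (i != len(lst)-1):
--                 dic[lst[i]] = [lst[i+1]]
--             else:
--                 dic[lst[i]] = [lst[0]]
--
--
--     return dic
-- ===== SOURCE B (Python) =====
-- def dicio_sucessores(lst):
--     n = len(lst)
--     keys = list(dict.fromkeys(lst))
--     return {k: [lst[(i + 1) % n] for i in range(n) if lst[i] == k] for k in keys}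
-- ===== Notes on version B (the rewrite author's own statement) =====
-- stated objective: alternative
-- what changed: Instead of one pass growing per-key lists with membership/branch bookkeeping, B first collects the distinct keys in first-occurrence order and then, for each key, gathers all its circular successors lst[(i+1)%n] in a single comprehension per key (a grouping-by-key nested scan rather than an incremental dict build).
import Mathlib
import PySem

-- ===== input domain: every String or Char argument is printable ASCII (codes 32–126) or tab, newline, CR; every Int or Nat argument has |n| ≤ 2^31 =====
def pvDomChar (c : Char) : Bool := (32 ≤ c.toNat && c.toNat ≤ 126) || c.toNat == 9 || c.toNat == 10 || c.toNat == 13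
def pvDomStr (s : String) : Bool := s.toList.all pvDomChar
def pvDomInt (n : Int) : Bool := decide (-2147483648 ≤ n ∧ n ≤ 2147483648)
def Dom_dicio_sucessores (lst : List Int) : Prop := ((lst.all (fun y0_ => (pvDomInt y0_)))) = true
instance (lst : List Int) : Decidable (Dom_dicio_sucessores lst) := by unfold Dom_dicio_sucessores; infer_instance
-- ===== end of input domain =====

-- B replaces A's incremental single-pass dict build (membership test + append/insert branches
-- at every index) by a grouping-by-key computation: the distinct keys in first-occurrence order
-- first, then one comprehension per key collecting all its circular successors lst[(i+1)%n];
-- objective: alternative (different algorithm, not claimed faster).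

-- ===== PORT A =====
-- indices drawn from range(0, len(lst), 1) are always in range, so pyGetD's default 0 is never read
def dicio_sucessores (lst : List Int) : List (Int × List Int) :=
  ((PySem.List.pyRange 0 (PySem.List.len lst) 1).foldl (fun dic i =>
    let k := PySem.List.pyGetD lst i 0
    if dic.contains k then
      if i ≠ PySem.List.len lst - 1 then
        dic.insert k (dic.getD k [] ++ [PySem.List.pyGetD lst (i + 1) 0])
      else
        dic.insert k (dic.getD k [] ++ [PySem.List.pyGetD lst 0 0])
    else
      if i ≠ PySem.List.len lst - 1 then
        dic.insert k [PySem.List.pyGetD lst (i + 1) 0]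
      else
        dic.insert k [PySem.List.pyGetD lst 0 0]) PySem.Dict.empty).items

-- ===== PORT B =====
-- keys = list(dict.fromkeys(lst)) is PySem.List.dedup; the dict comprehension is a fold of
-- inserts over those (fresh, distinct) keys, each value one comprehension over range(n)
def dicio_sucessores_alt (lst : List Int) : List (Int × List Int) :=
  let n := PySem.List.len lst
  let keys := PySem.List.dedup lst
  ((keys.foldl (fun d k =>
      d.insert k
        (((PySem.List.pyRange 0 n 1).filter (fun i => PySem.List.pyGetD lst i 0 == k)).map
          (fun i => PySem.List.pyGetD lst (PySem.Int.mod (i + 1) n) 0))) PySem.Dict.empty)).items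

-- ===== PRECONDITION & SPEC =====
def Spec_dicio_sucessores (lst : List Int) (out : List (Int × List Int)) : Prop := out = dicio_sucessores_alt lst
instance (lst : List Int) (out : List (Int × List Int)) : Decidable (Spec_dicio_sucessores lst out) := by unfold Spec_dicio_sucessores; infer_instance

-- ===== CLAIM (what is proved, stated in full; the proofs are below) =====
def Claim_equal_dicio_sucessores : Prop := ∀ (lst : List Int), Dom_dicio_sucessores lst → Spec_dicio_sucessores lst (dicio_sucessores lst)

-- ===== LEMMAS AND PROOFS =====

-- A's branchy step, written as a single modify with the circular successor value
theorem pv_modify_as_if (d : PySem.Dict Int (List Int)) (k v : Int) :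
    d.modify k [] (· ++ [v]) =
      if d.contains k then d.insert k (d.getD k [] ++ [v]) else d.insert k [v] := by
  unfold PySem.Dict.modify
  split <;> simp_all [PySem.Dict.getD_eq_get?_getD, PySem.Dict.contains_eq_isSome_get?]

theorem pv_stepA_eq (lst : List Int) (dic : PySem.Dict Int (List Int)) (j : Nat) (hj : j < lst.length) :
    (let k := PySem.List.pyGetD lst ((j : Nat) : Int) 0
     if dic.contains k then
       if ((j : Nat) : Int) ≠ ((lst.length : Int)) - 1 then
         dic.insert k (dic.getD k [] ++ [PySem.List.pyGetD lst (((j : Nat) : Int) + 1) 0])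
       else
         dic.insert k (dic.getD k [] ++ [PySem.List.pyGetD lst 0 0])
     else
       if ((j : Nat) : Int) ≠ ((lst.length : Int)) - 1 then
         dic.insert k [PySem.List.pyGetD lst (((j : Nat) : Int) + 1) 0]
       else
         dic.insert k [PySem.List.pyGetD lst 0 0]) =
    dic.modify (lst.getD j 0) [] (· ++ [lst.getD ((j + 1) % lst.length) 0]) := by
  rw [pv_modify_as_if]
  have hk : PySem.List.pyGetD lst ((j : Nat) : Int) 0 = lst.getD j 0 :=
    PySem.List.pyGetD_natCast lst j 0
  by_cases hlast : j = lst.length - 1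
  · have hcond : ¬ (((j : Nat) : Int) ≠ (lst.length : Int) - 1) := by omega
    have hmod : (j + 1) % lst.length = 0 := by
      have : j + 1 = lst.length := by omega
      simp [this]
    simp only [hk, hmod, hcond, if_false, PySem.List.pyGetD_zero]
  · have hcond : ((j : Nat) : Int) ≠ (lst.length : Int) - 1 := by omega
    have hmod : (j + 1) % lst.length = j + 1 := Nat.mod_eq_of_lt (by omega)
    have hk1 : PySem.List.pyGetD lst (((j : Nat) : Int) + 1) 0 = lst.getD (j + 1) 0 := by
      rw [show ((j : Nat) : Int) + 1 = (((j + 1 : Nat)) : Int) by push_cast; ring]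
      exact PySem.List.pyGetD_natCast lst (j + 1) 0
    simp only [hk, hk1, hmod]
    simp [hcond]

-- the key list extracted from the index range is lst itself
-- the key list extracted from the index range is lst itself
theorem pv_map_getD_range (lst : List Int) :
    (List.range lst.length).map (fun j => lst.getD j 0) = lst := by
  apply List.ext_getElem <;> simp
  intro j h
  simp [List.getElem?_eq_getElem h]

-- ===== VERDICT (by name: the statement is the Claim_ definition above) =====
theorem dicio_sucessores_spec : Claim_equal_dicio_sucessores := by
  intro lst _
  unfold Spec_dicio_sucessores dicio_sucessores dicio_sucessores_alt
  have hlen : PySem.List.len lst = (lst.length : Int) := by simp [PySem.List.len_eq]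
  -- A side: turn the index fold into a modify-fold over the (key, successor) pairs
  rw [hlen, PySem.List.pyRange_zero_natCast, List.foldl_map]
  rw [PySem.List.foldl_congr_mem _ _
        (fun dic j => dic.modify (lst.getD j 0) [] (· ++ [lst.getD ((j + 1) % lst.length) 0])) _
        (fun dic j hmem => pv_stepA_eq lst dic j (List.mem_range.mp hmem))]
  rw [show (List.range lst.length).foldl
        (fun dic j => dic.modify (lst.getD j 0) [] (· ++ [lst.getD ((j + 1) % lst.length) 0]))
        PySem.Dict.empty
      = ((List.range lst.length).map
          (fun j => (lst.getD j 0, lst.getD ((j + 1) % lst.length) 0))).foldl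
          (fun d p => d.modify p.1 [] (· ++ [p.2])) PySem.Dict.empty by
    rw [List.foldl_map]]
  have hnd : (((List.range lst.length).map
      (fun j => (lst.getD j 0, lst.getD ((j + 1) % lst.length) 0))).foldl
      (fun d p => d.modify p.1 [] (· ++ [p.2])) PySem.Dict.empty).keys.Nodup := by
    rw [List.foldl_map]
    exact PySem.Dict.nodup_keys_foldl_modify_key _ _ _ _ _ (by simp [PySem.Dict.keys_empty])
  rw [PySem.Dict.items_eq_map_keys _ hnd []]
  have hkeys : (((List.range lst.length).map
      (fun j => (lst.getD j 0, lst.getD ((j + 1) % lst.length) 0))).foldl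
      (fun d p => d.modify p.1 [] (· ++ [p.2])) PySem.Dict.empty).keys = PySem.Set.ofList lst := by
    rw [List.foldl_map,
        PySem.Dict.keys_foldl_modify_key (List.range lst.length)
          (fun j => lst.getD j 0) [] (fun _ j => (· ++ [lst.getD ((j + 1) % lst.length) 0]))
          PySem.Dict.empty,
        pv_map_getD_range, PySem.Set.ofList_eq_foldl]
    rfl
  rw [hkeys]
  -- B side: the dict comprehension over fresh distinct keys lists them in order
  rw [PySem.Dict.items_foldl_insert_fresh (PySem.List.dedup lst) (fun k => k) _ PySem.Dict.empty
        (fun a _ => PySem.Dict.contains_empty a) (by simp)]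
  rw [show (PySem.Dict.empty : PySem.Dict Int (List Int)).items = [] from rfl, List.nil_append]
  simp only [PySem.List.dedup_eq_ofList]
  -- pointwise: each key's value list agrees
  apply List.map_congr_left
  intro k _
  refine congrArg (fun v => (k, v)) ?_
  rw [PySem.Dict.getD_foldl_modify_append, PySem.Dict.getD_empty, List.nil_append]
  rw [List.filter_map, List.map_map]
  rw [PySem.List.pyRange_zero_natCast, List.filter_map, List.map_map]
  have hfilt : List.filter ((fun i => PySem.List.pyGetD lst i 0 == k) ∘ fun j => ((j : Nat) : Int))
      (List.range lst.length)
      = List.filter ((fun p => p.1 == k) ∘ fun j => (lst.getD j 0, lst.getD ((j + 1) % lst.length) 0))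
        (List.range lst.length) := by
    apply List.filter_congr
    intro j hj
    simp [Function.comp]
  rw [hfilt]
  apply List.map_congr_left
  intro j hj
  have hjn : j < lst.length := List.mem_range.mp (List.mem_of_mem_filter hj)
  simp only [Function.comp_apply]
  rw [show ((j : Nat) : Int) + 1 = (((j + 1 : Nat)) : Int) by push_cast; ring,
      PySem.Int.mod_natCast, PySem.List.pyGetD_natCast]
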